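-- pv_equiv track=rewrite | github.com/MaX-Lo/ProjectEuler | 062_cubic_permutations.py | generate_cubes_dict
-- ===== SOURCE A (Python) =====
-- def generate_cubes_dict(cubes):
--     """
--     generate a list with a dictionary for every cube, these dictionaries contain how many of each character the number contains
--     """
--     cubes_dict_ls = []
--     for cube in cubes:
--         cube_dict = {'0': 0, '1': 0, '2': 0, '3': 0, '4': 0, '5': 0, '6': 0, '7': 0, '8': 0, '9': 0}
--         for digit in cube:
--             cube_dict[digit] += 1
--         cubes_dict_ls.append(cube_dict)
--     return cubes_dict_ls
-- ===== SOURCE B (Python) =====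
-- def generate_cubes_dict(cubes):
--     """
--     generate a list with a dictionary for every cube, these dictionaries contain how many of each character the number contains
--     """
--     result = []
--     for cube in cubes:
--         # sort the digits, run-length encode the sorted list into (digit, count) runs
--         runs = []
--         for ch in sorted(cube):
--             if runs and runs[-1][0] == ch:
--                 runs[-1][1] += 1
--             else:
--                 runs.append([ch, 1])
--         # merge the (strictly increasing) runs with the full alphabet '0'..'9'
--         cube_dict = {}
--         i = 0
--         for digit in '0123456789':
--             if i < len(runs) and runs[i][0] == digit:
--                 cube_dict[digit] = runs[i][1]
--                 i += 1
--             else: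
--                 cube_dict[digit] = 0
--         result.append(cube_dict)
--     return result
-- ===== Notes on version B (the rewrite author's own statement) =====
-- stated objective: alternative
-- what changed: B sorts each string's characters, run-length encodes the sorted list into (digit,count) runs, and merges the strictly increasing runs against the alphabet '0'..'9', instead of A's single pass incrementing a pre-initialised counter dict per character; Pre_ excludes strings containing a non-digit character, on which A raises KeyError.
import Mathlib
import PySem

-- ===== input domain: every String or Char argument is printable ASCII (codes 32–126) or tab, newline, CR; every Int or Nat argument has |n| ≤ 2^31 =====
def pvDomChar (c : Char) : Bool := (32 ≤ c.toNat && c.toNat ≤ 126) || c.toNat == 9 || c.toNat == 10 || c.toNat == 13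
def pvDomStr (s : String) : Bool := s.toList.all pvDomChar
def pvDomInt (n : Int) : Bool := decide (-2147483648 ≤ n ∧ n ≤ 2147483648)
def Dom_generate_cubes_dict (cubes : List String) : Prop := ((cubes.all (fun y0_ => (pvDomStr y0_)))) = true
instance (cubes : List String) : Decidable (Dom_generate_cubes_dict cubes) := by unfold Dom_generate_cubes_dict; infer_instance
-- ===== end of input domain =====

-- B replaces A's per-character counter-dict pass by sort + run-length encoding + a merge of the
-- runs against the alphabet '0'..'9' (a genuinely different algorithm, same results on digit strings).

-- ===== PORT A =====
-- the dict literal {'0': 0, …, '9': 0}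
def pvBase : PySem.Dict String Int :=
  PySem.Dict.ofList [("0", 0), ("1", 0), ("2", 0), ("3", 0), ("4", 0), ("5", 0), ("6", 0), ("7", 0), ("8", 0), ("9", 0)]

-- 'cube_dict[digit] += 1' is Dict.modify; under Pre_ the key is always present, so the default 0 is
-- never used (a missing key is Python's KeyError, excluded by Pre_).
def generate_cubes_dict (cubes : List String) : List (List (String × Int)) :=
  cubes.foldl (fun cubes_dict_ls cube =>
    cubes_dict_ls ++
      [(cube.toList.foldl (fun cube_dict digit => cube_dict.modify (String.ofList [digit]) 0 (· + 1)) pvBase).items])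
    []

-- ===== PORT B =====
-- the run-length inner loop: 'if runs and runs[-1][0] == ch: runs[-1][1] += 1 else: runs.append([ch, 1])'
def pvRuns (s : List Char) : List (Char × Int) :=
  s.foldl (fun runs ch =>
    match runs.getLast? with
    | some (c, k) => if c = ch then runs.dropLast ++ [(c, k + 1)] else runs ++ [(ch, 1)]
    | none => [(ch, 1)]) []

-- the merge loop over '0123456789' with the run index i ('runs[i]' is getD; the guard keeps i in range)
def pvMerge (runs : List (Char × Int)) : List (String × Int) :=
  (("0123456789".toList).foldl (fun (st : List (String × Int) × Nat) digit =>
    if st.2 < runs.length ∧ (runs.getD st.2 (' ', 0)).1 = digit then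
      (st.1 ++ [(String.ofList [digit], (runs.getD st.2 (' ', 0)).2)], st.2 + 1)
    else
      (st.1 ++ [(String.ofList [digit], 0)], st.2)) ([], 0)).1

def generate_cubes_dict_alt (cubes : List String) : List (List (String × Int)) :=
  cubes.foldl (fun result cube =>
    result ++ [pvMerge (pvRuns (PySem.List.sorted cube.toList (fun x => x) false))]) []

-- ===== PRECONDITION & SPEC =====
def pvDigits : List Char := ['0','1','2','3','4','5','6','7','8','9']

-- Pre_ excludes inputs where some string contains a character outside '0'-'9': there A raises KeyError.
def Pre_generate_cubes_dict (cubes : List String) : Prop :=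
  (cubes.all (fun s => s.toList.all (fun c => decide (c ∈ pvDigits)))) = true
instance (cubes : List String) : Decidable (Pre_generate_cubes_dict cubes) := by unfold Pre_generate_cubes_dict; infer_instance

def pvWitness_generate_cubes_dict : List String := ["8", "64", ""]

def Spec_generate_cubes_dict (cubes : List String) (out : List (List (String × Int))) : Prop := out = generate_cubes_dict_alt cubes
instance (cubes : List String) (out : List (List (String × Int))) : Decidable (Spec_generate_cubes_dict cubes out) := by unfold Spec_generate_cubes_dict; infer_instance

-- ===== CLAIM (what is proved, stated in full; the proofs are below) =====
def Claim_equal_generate_cubes_dict : Prop := ∀ (cubes : List String), Dom_generate_cubes_dict cubes → Pre_generate_cubes_dict cubes → Spec_generate_cubes_dict cubes (generate_cubes_dict cubes)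

-- ===== LEMMAS AND PROOFS =====

-- recursive specification of B's merge loop (consumes the runs instead of indexing them)
def pvMergeC : List Char → List (Char × Int) → List (String × Int)
  | [], _ => []
  | d :: D, [] => (String.ofList [d], 0) :: pvMergeC D []
  | d :: D, (c, k) :: rs =>
    if c = d then (String.ofList [d], k) :: pvMergeC D rs
    else (String.ofList [d], 0) :: pvMergeC D ((c, k) :: rs)

-- ---- A side ----

theorem pv_digits_eq : "0123456789".toList = pvDigits := by decide

theorem pv_count_map_mk (s : List Char) (d : Char) :
    (s.map (fun c => String.ofList [c])).count (String.ofList [d]) = s.count d := by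
  induction s with
  | nil => rfl
  | cons h t ih =>
    simp only [List.map_cons, List.count_cons, ih]
    congr 1
    simp [beq_iff_eq, String.ofList_inj]

-- the ten digit keys, all present in pvBase
theorem pv_mem_keys_of_digit (c : Char) (h : c ∈ pvDigits) :
    String.ofList [c] ∈ pvBase.keys := by
  fin_cases h <;> decide

set_option maxRecDepth 4096 in
-- per-cube: A's increment loop over an all-digit string produces exactly the count table
theorem pv_cube_items (s : List Char) (h : ∀ c ∈ s, c ∈ pvDigits) :
    (s.foldl (fun cube_dict digit => cube_dict.modify (String.ofList [digit]) 0 (· + 1)) pvBase).items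
      = pvDigits.map (fun d => (String.ofList [d], (s.count d : Int))) := by
  have hkeys := PySem.Dict.keys_foldl_modify_key s (fun c => String.ofList [c]) (0 : Int) (fun _ _ => (· + 1)) pvBase
  have hkeq : (s.foldl (fun cube_dict digit => cube_dict.modify (String.ofList [digit]) 0 (· + 1)) pvBase).keys = pvBase.keys := by
    rw [hkeys, PySem.Set.update_eq_append_filter]
    have : (PySem.Set.ofList (s.map fun c => String.ofList [c])).filter (fun y => !PySem.Set.contains pvBase.keys y) = [] := by
      rw [List.filter_eq_nil_iff]
      intro y hy
      have := (PySem.Set.mem_ofList _ _).mp hy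
      obtain ⟨c, hc, rfl⟩ := List.mem_map.mp this
      simp [pv_mem_keys_of_digit c (h c hc)]
    rw [this, List.append_nil]
  have hnodup : (s.foldl (fun cube_dict digit => cube_dict.modify (String.ofList [digit]) 0 (· + 1)) pvBase).keys.Nodup := by
    rw [hkeq]; decide
  rw [PySem.Dict.items_eq_map_keys _ hnodup 0, hkeq]
  have hbk : pvBase.keys = pvDigits.map (fun c => String.ofList [c]) := by decide
  rw [hbk, List.map_map]
  apply List.map_congr_left
  intro d hd
  simp only [Function.comp]
  congr 1
  have hfold : s.foldl (fun cube_dict digit => cube_dict.modify (String.ofList [digit]) 0 (· + 1)) pvBase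
      = (s.map (fun c => String.ofList [c])).foldl (fun cube_dict k => cube_dict.modify k 0 (· + 1)) pvBase := by
    rw [List.foldl_map]
  rw [hfold, PySem.Dict.getD_foldl_modify_add_one, pv_count_map_mk]
  have : pvBase.getD (String.ofList [d]) 0 = 0 := by
    fin_cases hd <;> decide
  rw [this, zero_add]

-- ---- B side: sorted list in canonical form ----

theorem pv_pairwise_flatMap_replicate (D : List Char) (n : Char → Nat)
    (hD : D.Pairwise (· ≤ ·)) :
    (D.flatMap (fun d => List.replicate (n d) d)).Pairwise (· ≤ ·) := by
  induction D with
  | nil => simp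
  | cons d D ih =>
    simp only [List.flatMap_cons]
    rw [List.pairwise_append]
    refine ⟨List.pairwise_replicate.mpr (Or.inr le_rfl), ih hD.of_cons, ?_⟩
    intro a ha b hb
    obtain rfl := List.eq_of_mem_replicate ha
    obtain ⟨d', hd', hb'⟩ := List.mem_flatMap.mp hb
    obtain rfl := List.eq_of_mem_replicate hb'
    exact (List.pairwise_cons.mp hD).1 _ hd'

theorem pv_sorted_canon (s : List Char) (h : ∀ c ∈ s, c ∈ pvDigits) :
    PySem.List.sorted s (fun x => x) false
      = pvDigits.flatMap (fun d => List.replicate (s.count d) d) := by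
  apply PySem.List.sorted_id_eq_of_perm_of_pairwise
  · rw [List.perm_iff_count]
    intro c
    by_cases hc : c ∈ pvDigits
    · fin_cases hc <;>
        simp [pvDigits, List.flatMap_cons, List.count_append, List.count_replicate]
    · have h0 : s.count c = 0 := List.count_eq_zero.mpr (fun hmem => hc (h c hmem))
      rw [h0, List.count_eq_zero]
      intro hmem
      obtain ⟨d, hd, hb⟩ := List.mem_flatMap.mp hmem
      obtain rfl := List.eq_of_mem_replicate hb
      exact hc hd
  · exact pv_pairwise_flatMap_replicate _ _ (by decide)

-- ---- B side: run-length encoding of the canonical form ----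

theorem pv_runs_fold_same (c : Char) : ∀ (k : Nat) (rs : List (Char × Int)) (m : Int),
    (List.replicate k c).foldl (fun runs ch =>
      match runs.getLast? with
      | some (c', k') => if c' = ch then runs.dropLast ++ [(c', k' + 1)] else runs ++ [(ch, 1)]
      | none => [(ch, 1)]) (rs ++ [(c, m)]) = rs ++ [(c, m + k)] := by
  intro k
  induction k with
  | zero => intro rs m; simp
  | succ k ih =>
    intro rs m
    rw [List.replicate_succ, List.foldl_cons]
    have hlast : (rs ++ [(c, m)]).getLast? = some (c, m) := by simp
    simp only [hlast, List.dropLast_concat, if_true]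
    rw [ih rs (m + 1)]
    have hcast : m + 1 + (k : Int) = m + ((k + 1 : Nat) : Int) := by push_cast; ring
    rw [hcast]

theorem pv_runs_flatMap (n : Char → Nat) : ∀ (D : List Char) (rs : List (Char × Int)),
    D.Nodup → (∀ p ∈ rs, p.1 ∉ D) →
    (D.flatMap (fun d => List.replicate (n d) d)).foldl (fun runs ch =>
      match runs.getLast? with
      | some (c', k') => if c' = ch then runs.dropLast ++ [(c', k' + 1)] else runs ++ [(ch, 1)]
      | none => [(ch, 1)]) rs
      = rs ++ (D.filter (fun d => n d != 0)).map (fun d => (d, (n d : Int))) := by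
  intro D
  induction D with
  | nil => intro rs _ _; simp
  | cons d D ih =>
    intro rs hnd hrs
    simp only [List.flatMap_cons, List.foldl_append]
    by_cases hz : n d = 0
    · rw [hz]
      simp only [List.replicate_zero, List.foldl_nil]
      rw [ih rs hnd.of_cons (fun p hp => fun hmem => hrs p hp (List.mem_cons_of_mem _ hmem))]
      have : (d :: D).filter (fun d => n d != 0) = D.filter (fun d => n d != 0) := by
        simp [hz]
      rw [this]
    · obtain ⟨k, hk⟩ : ∃ k, n d = k + 1 := ⟨n d - 1, by omega⟩
      rw [hk]
      have hstep : (List.replicate (k + 1) d).foldl (fun runs ch =>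
          match runs.getLast? with
          | some (c', k') => if c' = ch then runs.dropLast ++ [(c', k' + 1)] else runs ++ [(ch, 1)]
          | none => [(ch, 1)]) rs = rs ++ [(d, (k : Int) + 1)] := by
        rw [List.replicate_succ, List.foldl_cons]
        have h1 : (match rs.getLast? with
            | some (c', k') => if c' = d then rs.dropLast ++ [(c', k' + 1)] else rs ++ [(d, 1)]
            | none => [(d, 1)]) = rs ++ [(d, (1 : Int))] := by
          cases hlast : rs.getLast? with
          | none => simp [List.getLast?_eq_none_iff.mp hlast]
          | some p =>
            obtain ⟨c', k'⟩ := p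
            have hc' : c' ≠ d := by
              have hmem : (c', k') ∈ rs := List.mem_of_getLast? hlast
              intro hcd
              exact hrs _ hmem (hcd ▸ List.mem_cons_self)
            simp [hc']
        rw [h1, pv_runs_fold_same d k rs 1]
        have : (1 : Int) + (k : Int) = (k : Int) + 1 := by omega
        rw [this]
      rw [hstep]
      have hnotin : ∀ p ∈ rs ++ [(d, (k : Int) + 1)], p.1 ∉ D := by
        intro p hp
        rcases List.mem_append.mp hp with hp' | hp'
        · exact fun hmem => hrs p hp' (List.mem_cons_of_mem _ hmem)
        · obtain rfl := List.mem_singleton.mp hp'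
          exact (List.nodup_cons.mp hnd).1
      rw [ih (rs ++ [(d, (k : Int) + 1)]) hnd.of_cons hnotin]
      have hfil : (d :: D).filter (fun d => n d != 0) = d :: D.filter (fun d => n d != 0) := by
        simp [hz]
      rw [hfil, List.map_cons, hk, List.append_assoc]
      simp

-- ---- B side: the merge loop equals the consuming merge ----

theorem pv_mergeC_cons (d : Char) (D : List Char) (q : Char × Int) (rs : List (Char × Int)) :
    pvMergeC (d :: D) (q :: rs)
      = if q.1 = d then (String.ofList [d], q.2) :: pvMergeC D rs
        else (String.ofList [d], 0) :: pvMergeC D (q :: rs) := by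
  obtain ⟨c, k⟩ := q
  rfl

theorem pv_merge_fold (rs : List (Char × Int)) : ∀ (D : List Char) (acc : List (String × Int)) (i : Nat),
    i ≤ rs.length →
    (D.foldl (fun (st : List (String × Int) × Nat) digit =>
      if st.2 < rs.length ∧ (rs.getD st.2 (' ', 0)).1 = digit then
        (st.1 ++ [(String.ofList [digit], (rs.getD st.2 (' ', 0)).2)], st.2 + 1)
      else
        (st.1 ++ [(String.ofList [digit], 0)], st.2)) (acc, i)).1
      = acc ++ pvMergeC D (rs.drop i) := by
  intro D
  induction D with
  | nil => intro acc i _; simp [pvMergeC]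
  | cons d D ih =>
    intro acc i hi
    rw [List.foldl_cons]
    by_cases hlt : i < rs.length
    · have hgetD : rs.getD i (' ', 0) = rs[i] := List.getD_eq_getElem rs _ hlt
      by_cases hc : (rs.getD i (' ', 0)).1 = d
      · rw [if_pos ⟨hlt, hc⟩, ih _ (i + 1) hlt, List.drop_eq_getElem_cons hlt,
          pv_mergeC_cons, if_pos (hgetD ▸ hc)]
        simp [List.getElem?_eq_getElem hlt]
      · rw [if_neg (fun hcon => hc hcon.2), ih _ i (le_of_lt hlt),
          List.drop_eq_getElem_cons hlt, pv_mergeC_cons, if_neg (fun he => hc (hgetD ▸ he))]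
        simp
    · have hi' : i = rs.length := le_antisymm hi (le_of_not_gt hlt)
      have hdrop : rs.drop i = [] := by simp [hi']
      have hcond : ¬ (i < rs.length ∧ (rs.getD i (' ', 0)).1 = d) := fun hc => hlt hc.1
      rw [if_neg hcond]
      rw [ih (acc ++ [(String.ofList [d], 0)]) i hi, hdrop]
      simp [pvMergeC]

theorem pv_mergeC_filter (p : Char → Bool) (f : Char → Int) : ∀ (D : List Char), D.Nodup →
    pvMergeC D ((D.filter p).map (fun c => (c, f c)))
      = D.map (fun d => (String.ofList [d], if p d then f d else 0)) := by
  intro D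
  induction D with
  | nil => intro _; simp [pvMergeC]
  | cons d D ih =>
    intro hnd
    by_cases hp : p d
    · rw [List.filter_cons_of_pos hp, List.map_cons]
      simp only [pvMergeC, if_true, List.map_cons]
      rw [ih hnd.of_cons, if_pos hp]
    · rw [List.filter_cons_of_neg (by simp [hp])]
      cases hrs : (D.filter p).map (fun c => (c, f c)) with
      | nil =>
        simp only [pvMergeC, List.map_cons]
        rw [← hrs, ih hnd.of_cons, if_neg (by simp [hp])]
      | cons q qs =>
        obtain ⟨c, k⟩ := q
        have hcd : c ≠ d := by
          have : (c, k) ∈ (D.filter p).map (fun c => (c, f c)) := by rw [hrs]; exact List.mem_cons_self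
          obtain ⟨c', hc', hceq⟩ := List.mem_map.mp this
          obtain ⟨rfl, -⟩ := Prod.mk.injEq .. ▸ hceq
          intro hcd
          exact (List.nodup_cons.mp hnd).1 (hcd ▸ List.mem_of_mem_filter hc')
        simp only [pvMergeC, if_neg hcd, List.map_cons]
        rw [← hrs, ih hnd.of_cons, if_neg (by simp [hp])]

-- per-cube: B's pipeline produces the same count table
theorem pv_cube_alt (s : List Char) (h : ∀ c ∈ s, c ∈ pvDigits) :
    pvMerge (pvRuns (PySem.List.sorted s (fun x => x) false))
      = pvDigits.map (fun d => (String.ofList [d], (s.count d : Int))) := by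
  rw [pv_sorted_canon s h]
  unfold pvRuns
  rw [pv_runs_flatMap (fun d => s.count d) pvDigits [] (by decide) (by simp)]
  rw [List.nil_append]
  unfold pvMerge
  rw [pv_digits_eq, pv_merge_fold _ pvDigits [] 0 (Nat.zero_le _), List.drop_zero, List.nil_append]
  rw [pv_mergeC_filter (fun d => s.count d != 0) (fun d => (s.count d : Int)) pvDigits (by decide)]
  apply List.map_congr_left
  intro d _
  congr 1
  split_ifs with hz
  · rfl
  · simp at hz
    simp [hz]

-- ===== VERDICT (by name: the statement is the Claim_ definition above) =====
theorem generate_cubes_dict_spec : Claim_equal_generate_cubes_dict := by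
  intro cubes _ hpre
  unfold Pre_generate_cubes_dict at hpre
  simp only [List.all_eq_true, decide_eq_true_eq] at hpre
  unfold Spec_generate_cubes_dict generate_cubes_dict generate_cubes_dict_alt
  rw [PySem.List.foldl_append_singleton_eq_map, PySem.List.foldl_append_singleton_eq_map]
  apply List.map_congr_left
  intro cube hcube
  rw [pv_cube_items cube.toList (hpre cube hcube), pv_cube_alt cube.toList (hpre cube hcube)]
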